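-- pv_equiv track=rewrite | github.com/TheTallPaul/Rental-Listing-Inquiries | wordFreq.py | parse
-- ===== SOURCE A (Python) =====
-- def parse(description):
-- 	s = []
-- 	temp = ""
-- 	for i in range (len(description)):
-- 		if (description[i] == ' ' or description[i] == "\n"):
-- 			s.append(temp)
-- 			temp = ""
-- 		else:
-- 			if description[i] != ",":
-- 				temp += description[i]
-- 	return s
-- ===== SOURCE B (Python) =====
-- def parse(description):
--     cleaned = description.replace(',', '').replace('\n', ' ')
--     return cleaned.split(' ')[:-1]
-- ===== Notes on version B (the rewrite author's own statement) =====
-- stated objective: simpler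
-- what changed: Replaced the index loop with a manual character accumulator by library string operations: strip commas and map newlines to spaces with replace, split on single spaces, and drop the trailing token with a [:-1] slice.
import Mathlib
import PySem

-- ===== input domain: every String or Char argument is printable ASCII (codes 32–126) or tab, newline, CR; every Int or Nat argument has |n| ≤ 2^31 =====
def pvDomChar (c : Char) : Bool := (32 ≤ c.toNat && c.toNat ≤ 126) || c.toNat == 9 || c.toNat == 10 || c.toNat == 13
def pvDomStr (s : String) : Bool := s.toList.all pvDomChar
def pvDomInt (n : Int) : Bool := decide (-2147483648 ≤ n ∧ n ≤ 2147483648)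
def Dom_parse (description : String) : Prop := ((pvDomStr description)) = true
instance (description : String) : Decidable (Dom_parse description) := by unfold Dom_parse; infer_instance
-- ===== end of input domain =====

-- B replaces A's manual index loop and character accumulator by library string
-- operations (replace / split / slice); same return values on every input.

-- ===== PORT A =====
-- A's loop body: append the finished word on ' '/'\n', skip ',', else extend temp
def parseStep (st : List String × List Char) (c : Char) : List String × List Char :=
  if c = ' ' ∨ c = '\n' then (st.1 ++ [String.ofList st.2], [])
  else if c ≠ ',' then (st.1, st.2 ++ [c]) else st

def parse (description : String) : List String :=
  (List.foldl
    (fun st i => parseStep st (PySem.List.pyGetD description.toList i ' '))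
    (([] : List String), ([] : List Char))
    (PySem.List.pyRange 0 (PySem.List.len description.toList))).1

-- ===== PORT B =====
def parse_alt (description : String) : List String :=
  let cleaned := PySem.Str.replace (PySem.Str.replace description "," "") "\n" " "
  let parts := (PySem.Str.split? cleaned " ").getD []
  PySem.List.slice parts none (some (-1))

-- ===== PRECONDITION & SPEC =====
def Spec_parse (description : String) (out : List String) : Prop := out = parse_alt description
instance (description : String) (out : List String) : Decidable (Spec_parse description out) := by unfold Spec_parse; infer_instance

-- ===== CLAIM (what is proved, stated in full; the proofs are below) =====
def Claim_equal_parse : Prop := ∀ (description : String), Dom_parse description → Spec_parse description (parse description)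

-- ===== LEMMAS AND PROOFS =====

-- A's tail behaviour: the words emitted by the rest of the loop from accumulator `temp`
def gA : List Char → List Char → List (List Char)
  | [], _ => []
  | c :: t, temp =>
    if c = ' ' ∨ c = '\n' then temp :: gA t []
    else if c ≠ ',' then gA t (temp ++ [c]) else gA t temp

-- single-character replace, forward recursion
def rep (o : Char) (new : List Char) : List Char → List Char
  | [] => []
  | c :: t => if c = o then new ++ rep o new t else c :: rep o new t

-- drop ',' and turn '\n' into ' ' in one pass
def clean : List Char → List Char
  | [] => []
  | c :: t => if c = ',' then clean t else if c = '\n' then ' ' :: clean t else c :: clean t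

-- split on ' ', forward recursion
def tokens : List Char → List Char → List (List Char)
  | [], cur => [cur]
  | c :: t, cur => if c = ' ' then cur :: tokens t [] else tokens t (cur ++ [c])

theorem foldl_parseStep (l : List Char) : ∀ (s : List String) (temp : List Char),
    (List.foldl parseStep (s, temp) l).1 = s ++ (gA l temp).map String.ofList := by
  induction l with
  | nil => intro s temp; simp [gA]
  | cons c t ih =>
    intro s temp
    by_cases h1 : c = ' ' ∨ c = '\n'
    · simp [parseStep, gA, h1, ih]
    · by_cases h2 : c = ','
      · simp [parseStep, gA, h1, h2, ih]
      · simp [parseStep, gA, h1, h2, ih]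

theorem rep_go (o : Char) (new : List Char) (l : List Char) :
    ∀ (fuel : Nat) (acc : List Char), l.length ≤ fuel →
      PySem.Chars.replace.go [o] new fuel l acc = acc.reverse ++ rep o new l := by
  induction l with
  | nil =>
    intro fuel acc _
    cases fuel <;> rw [PySem.Chars.replace.go.eq_def] <;> simp [rep]
  | cons c t ih =>
    intro fuel acc h
    cases fuel with
    | zero => simp at h
    | succ f =>
      rw [PySem.Chars.replace.go.eq_def]
      by_cases hc : c = o
      · have hp : ([o].isPrefixOf (c :: t)) = true := by simp [List.isPrefixOf, hc]
        simp only [hp]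
        simp [rep, hc, ih f _ (by simpa using h)]
      · have : ([o].isPrefixOf (c :: t)) = false := by
          simp [List.isPrefixOf]; exact fun h' => absurd h'.symm hc
        simp only [this]
        simp [rep, hc, ih f _ (by simpa using h)]

theorem replace_single (o : Char) (new l : List Char) :
    PySem.Chars.replace l [o] new = rep o new l := by
  rw [PySem.Chars.replace]
  simpa using rep_go o new l l.length [] le_rfl

theorem clean_eq (l : List Char) : rep '\n' [' '] (rep ',' [] l) = clean l := by
  induction l with
  | nil => simp [rep, clean]
  | cons c t ih =>
    by_cases h1 : c = ','
    · simp [rep, clean, h1, ih]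
    · by_cases h2 : c = '\n'
      · simp [rep, clean, h1, h2, ih]
      · simp [rep, clean, h1, h2, ih]

theorem split_go (l : List Char) :
    ∀ (fuel : Nat) (cur : List Char) (acc : List (List Char)), l.length ≤ fuel →
      PySem.Chars.splitOn.go [' '] fuel l cur acc = acc.reverse ++ tokens l cur.reverse := by
  induction l with
  | nil =>
    intro fuel acc _ _
    cases fuel <;> rw [PySem.Chars.splitOn.go.eq_def] <;> simp [tokens]
  | cons c t ih =>
    intro fuel cur acc h
    cases fuel with
    | zero => simp at h
    | succ f =>
      rw [PySem.Chars.splitOn.go.eq_def]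
      by_cases hc : c = ' '
      · have hp : ([' '].isPrefixOf (c :: t)) = true := by simp [List.isPrefixOf, hc]
        simp only [hp]
        simp [tokens, hc, ih f _ _ (by simpa using h)]
      · have hp : ([' '].isPrefixOf (c :: t)) = false := by
          simp [List.isPrefixOf]; exact fun h' => absurd h'.symm hc
        simp only [hp]
        simp [tokens, hc, ih f _ _ (by simpa using h)]

theorem splitOn_space (l : List Char) : PySem.Chars.splitOn l [' '] = tokens l [] := by
  rw [PySem.Chars.splitOn]
  simpa using split_go l (l.length + 1) [] [] (by omega)

theorem tokens_ne_nil (l : List Char) (cur : List Char) : tokens l cur ≠ [] := by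
  induction l generalizing cur with
  | nil => simp [tokens]
  | cons c t ih => by_cases hc : c = ' ' <;> simp [tokens, hc, ih]

theorem gA_eq_tokens (l : List Char) : ∀ (temp : List Char),
    gA l temp = (tokens (clean l) temp).dropLast := by
  induction l with
  | nil => intro temp; simp [gA, clean, tokens]
  | cons c t ih =>
    intro temp
    by_cases h1 : c = ' ' ∨ c = '\n'
    · have hc : c ≠ ',' := by rcases h1 with h | h <;> simp [h]
      have hcl : clean (c :: t) = ' ' :: clean t := by
        rcases h1 with h | h <;> simp [clean, h]
      rw [hcl]
      simp only [gA, h1, if_pos, tokens]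
      rw [List.dropLast_cons_of_ne_nil (tokens_ne_nil _ _)]
      simp [ih]
    · push_neg at h1
      by_cases h2 : c = ','
      · simp [gA, h2, clean, ih]
      · have hcl : clean (c :: t) = c :: clean t := by simp [clean, h2, h1.2]
        rw [hcl]
        simp [gA, h1, h2, tokens, ih]

theorem parse_eq_gA (d : String) : parse d = (gA d.toList []).map String.ofList := by
  rw [parse]
  rw [PySem.List.foldl_pyRange_pyGetD d.toList ' ' parseStep ([], []) le_rfl]
  simpa using foldl_parseStep d.toList [] []

theorem parse_alt_eq (d : String) :
    parse_alt d = (tokens (clean d.toList) []).dropLast.map String.ofList := by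
  rw [parse_alt]
  have hclean : (PySem.Str.replace (PySem.Str.replace d "," "") "\n" " ").toList
      = clean d.toList := by
    rw [PySem.Str.toList_replace, PySem.Str.toList_replace]
    show PySem.Chars.replace (PySem.Chars.replace d.toList [','] []) ['\n'] [' '] = _
    rw [replace_single, replace_single, clean_eq]
  rw [PySem.Str.split?]
  show PySem.List.slice
      ((Option.map (fun x => List.map String.ofList x)
        (PySem.Chars.split? (PySem.Str.replace (PySem.Str.replace d "," "") "\n" " ").toList
          " ".toList)).getD []) none (some (-1)) = _
  rw [hclean]
  have : PySem.Chars.split? (clean d.toList) " ".toList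
      = some (tokens (clean d.toList) []) := by
    show PySem.Chars.split? (clean d.toList) [' '] = _
    rw [PySem.Chars.split?]
    simp [splitOn_space]
  rw [this]
  simp [PySem.List.slice_to_neg_one, List.map_dropLast]

-- ===== VERDICT (by name: the statement is the Claim_ definition above) =====
theorem parse_spec : Claim_equal_parse := by
  intro d _
  show parse d = parse_alt d
  rw [parse_eq_gA, parse_alt_eq, gA_eq_tokens]
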